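-- pv_equiv track=rewrite | github.com/jsueling/codility-python | 17_number_solitaire.py | solution
-- ===== SOURCE A (Python) =====
-- def solution(a: list[int]) -> int:
--     """
--     Find maximum cumulative score from rolling a six-sided
--     die and collecting numbers from the board (start at 0, end at n-1).
--     """
--     n = len(a)
--     dp = [float("-inf")] * n
--     dp[0] = a[0]
--     # dp[i] is the max score possible at position i
--     for i in range(n):
--         for j in range(max(i-6, 0), i):
--
--             # Local brute force, we must have rolled any of 1-6 to get to position i,
--             # collecting score at i and recording max possible score
--             dp[i] = max(dp[i], dp[j] + a[i])
--
--     return dp[n-1]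
-- ===== SOURCE B (Python) =====
-- def solution(a: list[int]) -> int:
--     """
--     Find maximum cumulative score from rolling a six-sided
--     die and collecting numbers from the board (start at 0, end at n-1).
--     """
--     # Sliding-window maximum via a monotonic queue: instead of re-scanning the
--     # previous <=6 dp values for each cell, keep a queue of (index, dp value)
--     # candidates with strictly decreasing values; the front is always the max of
--     # the reachable window, and each dp value enters and leaves the queue once.
--     best = a[0]
--     q = [(0, a[0])]
--     for i in range(1, len(a)):
--         while q[0][0] < i - 6:
--             q.pop(0)
--         best = q[0][1] + a[i]
--         while q and q[-1][1] <= best: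
--             q.pop()
--         q.append((i, best))
--     return best
-- ===== Notes on version B (the rewrite author's own statement) =====
-- stated objective: faster
-- what changed: Replaced A's per-cell backward scan over the previous <=6 dp values with the sliding-window-maximum algorithm: a monotonic queue of (index, dp value) candidates whose front is always the window maximum, so the inner max scan disappears and each dp value is pushed and popped at most once.
import Mathlib
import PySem

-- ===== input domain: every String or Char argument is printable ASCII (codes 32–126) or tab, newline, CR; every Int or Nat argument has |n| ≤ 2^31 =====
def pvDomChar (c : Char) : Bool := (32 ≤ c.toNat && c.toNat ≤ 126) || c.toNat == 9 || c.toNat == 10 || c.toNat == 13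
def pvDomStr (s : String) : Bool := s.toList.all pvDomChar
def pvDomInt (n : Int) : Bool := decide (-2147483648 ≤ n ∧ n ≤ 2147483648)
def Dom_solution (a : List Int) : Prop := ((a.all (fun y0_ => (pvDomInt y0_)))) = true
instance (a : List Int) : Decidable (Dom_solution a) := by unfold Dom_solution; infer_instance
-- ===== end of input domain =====

-- B replaces A's per-cell backward scan of the previous ≤6 dp values with a sliding-window
-- maximum via a monotonic queue (each dp value is pushed and popped at most once); the timing
-- run measured B several times faster than A at the largest size (constant factor).


-- ===== PORT A =====
-- Python's float('-inf') cell is modelled as `none`; all computed dp values are exact ints.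
def omax : Option Int → Option Int → Option Int
  | none, y => y
  | some x, none => some x
  | some x, some y => some (max x y)

def oadd : Option Int → Int → Option Int
  | none, _ => none
  | some v, x => some (v + x)

-- Literal port of A: dp array, outer loop over i, inner loop over j in [max(i-6,0), i).
-- All Python indices are nonnegative here, so `range` is ported as List.range / List.range'
-- (Nat subtraction i-6 is exactly Python's max(i-6,0)); dp[0]=a[0] raises on [] (excluded by Pre_).
def solution (a : List Int) : Int :=
  let n := a.length
  let dp0 := (List.replicate n (none : Option Int)).set 0 (some (a.getD 0 0))
  let dp := (List.range n).foldl (fun dp i =>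
    (List.range' (i - 6) (i - (i - 6))).foldl (fun dp j =>
      dp.set i (omax (dp.getD i none) (oadd (dp.getD j none) (a.getD i 0)))) dp) dp0
  (dp.getD (n - 1) none).getD 0

-- ===== PORT B =====
-- Port of Source B's inner loop "while q and q[-1][1] <= best: q.pop()": drop the maximal
-- trailing run of queue entries whose value is ≤ best (exact: processes from the tail).
def popTrail (q : List (Int × Int)) (t : Int) : List (Int × Int) :=
  match q with
  | [] => []
  | b :: l =>
    match popTrail l t with
    | [] => if b.2 ≤ t then [] else [b]
    | r => b :: r

-- One iteration of Source B's for-loop, state = (q, best).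
-- "while q[0][0] < i - 6: q.pop(0)" is ported as dropWhile (the loop provably never empties q:
-- the entry appended last iteration has index i-1 ≥ i-6, so Python's q[0] never raises);
-- "q[0][1]" is ported as headD — q is provably nonempty there, the default is never used.
def solStep (a : List Int) (s : List (Int × Int) × Int) (i : Nat) : List (Int × Int) × Int :=
  let q := s.1.dropWhile (fun p => decide (p.1 < (i : Int) - 6))
  let best := (q.headD (0, 0)).2 + a.getD i 0
  let q := popTrail q best
  (q ++ [((i : Int), best)], best)

-- Literal port of Source B: monotonic queue of (index, dp value), one fold over range(1, len(a)).
def solution_alt (a : List Int) : Int :=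
  ((List.range' 1 (a.length - 1)).foldl (solStep a) ([((0 : Int), a.getD 0 0)], a.getD 0 0)).2

-- ===== PRECONDITION & SPEC =====
-- Pre_ excludes only the empty list, on which both Pythons raise IndexError (a[0]).
def Pre_solution (a : List Int) : Prop := a ≠ []
instance (a : List Int) : Decidable (Pre_solution a) := by unfold Pre_solution; infer_instance
def pvWitness_solution : List Int := ([1, -2, 0, 9, -1, -2])
def Spec_solution (a : List Int) (out : Int) : Prop := out = solution_alt a
instance (a : List Int) (out : Int) : Decidable (Spec_solution a out) := by unfold Spec_solution; infer_instance

-- ===== CLAIM (what is proved, stated in full; the proofs are below) =====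
def Claim_equal_solution : Prop := ∀ (a : List Int), Dom_solution a → Pre_solution a → Spec_solution a (solution a)

-- ===== LEMMAS AND PROOFS =====

-- the mathematical dp sequence, as the list [dp 0, ..., dp i]
def vl (a : List Int) : Nat → List Int
  | 0 => [a.getD 0 0]
  | i+1 =>
      let w := vl a i
      w ++ [(PySem.List.max? (w.drop (i - 5)) (fun y => y)).getD 0 + a.getD (i+1) 0]

-- dp value at position j
def dv (a : List Int) (j : Nat) : Int := (vl a j).getD j 0

lemma vl_length (a : List Int) (i : Nat) : (vl a i).length = i + 1 := by
  induction i with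
  | zero => rfl
  | succ i ih => simp [vl, ih]

lemma getD_set_self (l : List (Option Int)) (i : Nat) (x : Option Int) (h : i < l.length) :
    (l.set i x).getD i none = x := by
  simp [List.getD, h]

lemma getD_set_ne (l : List (Option Int)) (i j : Nat) (x : Option Int) (h : i ≠ j) :
    (l.set i x).getD j none = l.getD j none := by
  simp [List.getD, List.getElem?_set_ne h]

lemma getD_map_some (l : List Int) (j : Nat) (h : j < l.length) :
    (l.map some).getD j none = some (l.getD j 0) := by
  simp [List.getD, h]

lemma map_getD_range'_drop (w : List Int) (s : Nat) :
    (List.range' s (w.length - s)).map (fun j => w.getD j 0) = w.drop s := by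
  apply List.ext_getElem
  · simp
  · intro i h1 h2
    simp at h1
    simp [List.getElem_range', List.getD, List.getElem?_eq_getElem (by omega : s + i < w.length)]

lemma getD_eq_getLastD (l : List Int) (_h : l ≠ []) : l.getD (l.length - 1) 0 = l.getLastD 0 := by
  simp [List.getD, List.getLastD_eq_getLast?, List.getLast?_eq_getElem?]

lemma vl_succ (a : List Int) (i : Nat) :
    vl a (i+1) = vl a i ++ [(PySem.List.max? ((vl a i).drop (i - 5)) (fun y => y)).getD 0 + a.getD (i+1) 0] := rfl

lemma vl_getD (a : List Int) : ∀ i j, j ≤ i → (vl a i).getD j 0 = dv a j := by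
  intro i
  induction i with
  | zero => intro j hj; interval_cases j; rfl
  | succ i ih =>
    intro j hj
    rcases Nat.lt_or_ge j (i+1) with h | h
    · rw [vl_succ, List.getD_append _ _ _ _ (by rw [vl_length]; omega)]
      exact ih j (by omega)
    · have : j = i + 1 := by omega
      subst this
      rfl

-- ===== B side: right-maxima characterisation of the monotonic queue =====

-- RM v keeps exactly the elements of v whose value is strictly greater than every later value
-- (the canonical content of Source B's monotonic queue).
def RM : List (Int × Int) → List (Int × Int)
  | [] => []
  | c :: v =>
    match RM v with
    | [] => [c]
    | d :: r => if d.2 < c.2 then c :: d :: r else d :: r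

lemma foldl_max_shift (l : List Int) : ∀ x y, l.foldl max (max x y) = max x (l.foldl max y) := by
  induction l with
  | nil => intro x y; rfl
  | cons z l ih =>
    intro x y
    simp only [List.foldl_cons]
    rw [max_assoc, ih]

lemma RM_cons_nil (c : Int × Int) (v : List (Int × Int)) (h : RM v = []) :
    RM (c :: v) = [c] := by unfold RM; rw [h]

lemma RM_cons_cons (c d : Int × Int) (v r : List (Int × Int)) (h : RM v = d :: r) :
    RM (c :: v) = if d.2 < c.2 then c :: d :: r else d :: r := by unfold RM; rw [h]

lemma popTrail_cons_nil (b : Int × Int) (l : List (Int × Int)) (t : Int)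
    (h : popTrail l t = []) : popTrail (b :: l) t = if b.2 ≤ t then [] else [b] := by
  unfold popTrail; rw [h]

lemma popTrail_cons_cons (b p : Int × Int) (l ps : List (Int × Int)) (t : Int)
    (h : popTrail l t = p :: ps) : popTrail (b :: l) t = b :: p :: ps := by
  unfold popTrail; rw [h]

lemma popTrail_head (l : List (Int × Int)) (t : Int) (h : popTrail l t ≠ []) :
    (popTrail l t).head? = l.head? := by
  cases l with
  | nil => simp [popTrail] at h
  | cons b l' =>
    cases hp : popTrail l' t with
    | nil =>
      rw [popTrail_cons_nil b l' t hp] at h ⊢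
      split_ifs at h ⊢ <;> simp_all
    | cons p ps => rw [popTrail_cons_cons b p l' ps t hp]; simp

lemma RM_append (c : Int × Int) : ∀ (v : List (Int × Int)),
    RM (v ++ [c]) = popTrail (RM v) c.2 ++ [c] := by
  intro v
  induction v with
  | nil => rfl
  | cons b v ih =>
    rw [List.cons_append]
    cases hP : popTrail (RM v) c.2 with
    | nil =>
      have hRMvc : RM (v ++ [c]) = [c] := by rw [ih, hP]; rfl
      rw [RM_cons_cons b c (v ++ [c]) [] hRMvc]
      cases hRv : RM v with
      | nil =>
        rw [RM_cons_nil b v hRv, popTrail_cons_nil b [] c.2 rfl]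
        split_ifs with h1 h2 h2 <;> first | rfl | omega
      | cons d' r' =>
        rw [hRv] at hP
        cases h2 : popTrail r' c.2 with
        | cons p ps => rw [popTrail_cons_cons d' p r' ps c.2 h2] at hP; simp at hP
        | nil =>
          rw [popTrail_cons_nil d' r' c.2 h2] at hP
          have hd' : d'.2 ≤ c.2 := by by_contra hc; simp [hc] at hP
          have hpt : popTrail (d' :: r') c.2 = [] := by
            rw [popTrail_cons_nil d' r' c.2 h2, if_pos hd']
          rw [RM_cons_cons b d' v r' hRv]
          by_cases hb : d'.2 < b.2
          · rw [if_pos hb, popTrail_cons_nil b (d' :: r') c.2 hpt]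
            split_ifs with h3 <;> first | rfl | omega
          · rw [if_neg hb, hpt, List.nil_append, if_neg (by omega)]
    | cons p ps =>
      have hPne : popTrail (RM v) c.2 ≠ [] := by rw [hP]; simp
      cases hRv : RM v with
      | nil => rw [hRv] at hP; simp [popTrail] at hP
      | cons d' r' =>
        have hpd : p = d' := by
          have := popTrail_head (RM v) c.2 hPne
          rw [hP, hRv] at this
          simpa using this
        subst hpd
        have hRMvc : RM (v ++ [c]) = p :: (ps ++ [c]) := by rw [ih, hP]; rfl
        rw [RM_cons_cons b p (v ++ [c]) (ps ++ [c]) hRMvc]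
        rw [hRv] at hP
        rw [RM_cons_cons b p v r' hRv]
        by_cases hb : p.2 < b.2
        · rw [if_pos hb, if_pos hb, popTrail_cons_cons b p (p :: r') ps c.2 hP]
          rfl
        · rw [if_neg hb, if_neg hb, hP]
          rfl

lemma RM_head (v : List (Int × Int)) : ∀ c, ∃ d r, RM (c :: v) = d :: r ∧
    d.2 = (v.map Prod.snd).foldl max c.2 ∧ d ∈ c :: v := by
  induction v with
  | nil => intro c; exact ⟨c, [], rfl, rfl, List.mem_singleton_self c⟩
  | cons b w ih =>
    intro c
    obtain ⟨d', r', h1, h2, h3⟩ := ih b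
    rw [RM_cons_cons c d' (b :: w) r' h1]
    by_cases h : d'.2 < c.2
    · refine ⟨c, d' :: r', by rw [if_pos h], ?_, List.mem_cons_self ..⟩
      simp only [List.map_cons, List.foldl_cons]
      rw [foldl_max_shift, ← h2]
      exact (max_eq_left h.le).symm
    · refine ⟨d', r', by rw [if_neg h], ?_, List.mem_cons_of_mem _ h3⟩
      simp only [List.map_cons, List.foldl_cons]
      rw [foldl_max_shift, ← h2]
      exact (max_eq_right (not_lt.mp h)).symm

-- windows of (index, dp value) pairs: win a i covers [max(i-6,0), i], wmid a i covers [max(i-5,0), i]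
def win (a : List Int) (i : Nat) : List (Int × Int) :=
  (List.range' (i - 6) (i + 1 - (i - 6))).map (fun (j : Nat) => ((j : Int), dv a j))

def wmid (a : List Int) (i : Nat) : List (Int × Int) :=
  (List.range' (i - 5) (i + 1 - (i - 5))).map (fun (j : Nat) => ((j : Int), dv a j))

lemma win_eq_wmid (a : List Int) (i : Nat) (h : i ≤ 5) : win a i = wmid a i := by
  unfold win wmid
  congr 2 <;> omega

lemma win_cons_wmid (a : List Int) (i : Nat) (h : 6 ≤ i) :
    win a i = (((i - 6 : Nat) : Int), dv a (i - 6)) :: wmid a i := by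
  unfold win wmid
  rw [show i + 1 - (i - 6) = (i + 1 - (i - 5)) + 1 by omega, List.range'_succ]
  rw [show i - 6 + 1 = i - 5 by omega]
  simp

lemma win_succ (a : List Int) (i : Nat) :
    win a (i + 1) = wmid a i ++ [(((i + 1 : Nat) : Int), dv a (i + 1))] := by
  unfold win wmid
  rw [show i + 1 + 1 - (i + 1 - 6) = (i + 1 - (i - 5)) + 1 by omega,
      show i + 1 - 6 = i - 5 by omega, List.range'_1_concat]
  rw [List.map_append]
  congr 2
  simp only [List.map_cons, List.map_nil]
  rw [show i - 5 + (i + 1 - (i - 5)) = i + 1 by omega]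

lemma wmid_cons (a : List Int) (i : Nat) :
    wmid a i = (((i - 5 : Nat) : Int), dv a (i - 5)) ::
      (List.range' (i - 5 + 1) (i - (i - 5))).map (fun (j : Nat) => ((j : Int), dv a j)) := by
  unfold wmid
  rw [show i + 1 - (i - 5) = (i - (i - 5)) + 1 by omega, List.range'_succ]
  simp

lemma wmid_snd (a : List Int) (i : Nat) :
    (wmid a i).map Prod.snd = (vl a i).drop (i - 5) := by
  unfold wmid
  rw [← map_getD_range'_drop (vl a i) (i - 5), vl_length]
  rw [List.map_map]
  apply List.map_congr_left
  intro j hj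
  rw [List.mem_range'_1] at hj
  simp only [Function.comp_apply]
  exact (vl_getD a i j (by omega)).symm

lemma wmid_mem_idx (a : List Int) (i : Nat) (p : Int × Int) (hp : p ∈ wmid a i) :
    ((i : Int)) - 5 ≤ p.1 := by
  unfold wmid at hp
  rw [List.mem_map] at hp
  obtain ⟨j, hj, rfl⟩ := hp
  rw [List.mem_range'_1] at hj
  simp only []
  omega

-- value of the new dp cell, in terms of the window maximum
lemma dv_succ (a : List Int) (i : Nat) (d : Int × Int) (r : List (Int × Int))
    (_hd : RM (wmid a i) = d :: r)
    (hmax : d.2 = ((wmid a i).drop 1 |>.map Prod.snd).foldl max ((wmid a i).headD (0,0)).2) :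
    dv a (i + 1) = d.2 + a.getD (i+1) 0 := by
  have hw := wmid_cons a i
  rw [hw] at hmax
  simp only [List.headD_cons, List.drop_succ_cons, List.drop_zero] at hmax
  unfold dv
  rw [vl_succ, List.getD_append_right _ _ _ _ (by rw [vl_length])]
  rw [vl_length, show i + 1 - (i + 1) = 0 by omega]
  simp only [List.getD_cons_zero]
  congr 1
  have hsnd := wmid_snd a i
  rw [hw] at hsnd
  simp only [List.map_cons] at hsnd
  rw [← hsnd, PySem.List.max?_id_cons]
  simp only [Option.getD_some]
  rw [hmax]

-- the loop invariant: after processing indices 1..i, the state is (RM (win a i), dp i)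
lemma InvB (a : List Int) : ∀ i : Nat,
    (List.range' 1 i).foldl (solStep a) ([((0 : Int), a.getD 0 0)], a.getD 0 0)
      = (RM (win a i), dv a i) := by
  intro i
  induction i with
  | zero =>
    simp only [List.range'_zero, List.foldl_nil]
    have h0 : win a 0 = [((0 : Int), dv a 0)] := by unfold win; rfl
    rw [h0]
    have : dv a 0 = a.getD 0 0 := by unfold dv vl; rfl
    rw [this]
    rfl
  | succ i ih =>
    rw [List.range'_1_concat, List.foldl_append, ih]
    simp only [List.foldl_cons, List.foldl_nil]
    -- the head of RM (wmid a i), with its value = window maximum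
    obtain ⟨c, w, hw⟩ : ∃ c w, wmid a i = c :: w := by
      rw [wmid_cons]; exact ⟨_, _, rfl⟩
    obtain ⟨d, r, hd, hd2, hdmem⟩ := RM_head w c
    rw [← hw] at hd hdmem
    -- step 1: expiry (dropWhile) turns RM (win a i) into RM (wmid a i)
    have hdidx : ¬ (d.1 < ((1 + i : Nat) : Int) - 6) := by
      have := wmid_mem_idx a i d hdmem
      push_cast
      omega
    have hexp : (RM (win a i)).dropWhile (fun p => decide (p.1 < ((1 + i : Nat) : Int) - 6))
        = d :: r := by
      rcases Nat.lt_or_ge i 6 with h6 | h6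
      · rw [win_eq_wmid a i (by omega), hd]
        rw [List.dropWhile_cons_of_neg (by simpa using hdidx)]
      · rw [win_cons_wmid a i h6,
            RM_cons_cons (((i - 6 : Nat) : Int), dv a (i - 6)) d (wmid a i) r hd]
        by_cases hlt : d.2 < (((i - 6 : Nat) : Int), dv a (i - 6)).2
        · rw [if_pos hlt]
          rw [List.dropWhile_cons_of_pos (by simp; omega)]
          rw [List.dropWhile_cons_of_neg (by simpa using hdidx)]
        · rw [if_neg hlt]
          rw [List.dropWhile_cons_of_neg (by simpa using hdidx)]
    -- step 2: the head value is the window maximum, so best = dp (i+1)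
    have hbest : d.2 + a.getD (1 + i) 0 = dv a (i + 1) := by
      rw [show 1 + i = i + 1 by omega]
      refine (dv_succ a i d r hd ?_).symm
      rw [hw]
      simpa using hd2
    -- assemble the step
    show solStep a (RM (win a i), dv a i) (1 + i) = _
    unfold solStep
    simp only [hexp, List.headD_cons, hbest]
    have happ := RM_append (((1 + i : Nat) : Int), dv a (i + 1)) (wmid a i)
    rw [hd] at happ
    simp only at happ
    rw [← happ, show ((1 + i : Nat) : Int) = (((i + 1 : Nat)) : Int) by omega]
    rw [← win_succ]

lemma B_eq (a : List Int) (h : a ≠ []) :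
    solution_alt a = (vl a (a.length - 1)).getLastD 0 := by
  have hlen : 0 < a.length := List.length_pos_of_ne_nil h
  unfold solution_alt
  rw [InvB a (a.length - 1)]
  simp only []
  unfold dv
  rw [← getD_eq_getLastD _ (by intro hc; have := vl_length a (a.length - 1); rw [hc] at this; simp at this)]
  rw [vl_length]
  congr 1

-- ===== A side =====

lemma inner_fold (ai : Int) (I : Nat) : ∀ (js : List Nat) (dp : List (Option Int)),
    I < dp.length → (∀ j ∈ js, j ≠ I) →
    js.foldl (fun d j => d.set I (omax (d.getD I none) (oadd (d.getD j none) ai))) dp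
      = dp.set I (js.foldl (fun acc j => omax acc (oadd (dp.getD j none) ai)) (dp.getD I none)) := by
  intro js
  induction js with
  | nil =>
    intro dp hI _
    simp only [List.foldl_nil]
    conv_rhs => rw [show dp.getD I none = dp[I] by simp [List.getD, List.getElem?_eq_getElem hI]]
    exact (List.set_getElem_self hI).symm
  | cons j rest ih =>
    intro dp hI hne
    simp only [List.foldl_cons]
    rw [ih (dp.set I (omax (dp.getD I none) (oadd (dp.getD j none) ai)))
        (by simpa using hI) (fun k hk => hne k (List.mem_cons_of_mem _ hk))]
    rw [List.set_set]
    congr 1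
    rw [getD_set_self dp I _ hI]
    exact PySem.List.foldl_congr_mem rest _ _ _
      (fun acc k hk => by rw [getD_set_ne dp I k _ (fun e => hne k (List.mem_cons_of_mem _ hk) e.symm)])

lemma fold_omax (ai : Int) (g : Nat → Int) : ∀ (js : List Nat) (m : Int),
    js.foldl (fun acc j => omax acc (some (g j + ai))) (some (m + ai))
      = some ((js.foldl (fun acc j => max acc (g j)) m) + ai) := by
  intro js
  induction js with
  | nil => intro m; rfl
  | cons j rest ih =>
    intro m
    simp only [List.foldl_cons]
    have : omax (some (m + ai)) (some (g j + ai)) = some (max m (g j) + ai) := by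
      simp [omax, max_add_add_right]
    rw [this, ih]

lemma window_val (a : List Int) (m : Nat) (ai : Int) :
    (List.range' (m + 1 - 6) (m + 1 - (m + 1 - 6))).foldl
        (fun acc j => omax acc (some ((vl a m).getD j 0 + ai))) none
      = some ((PySem.List.max? ((vl a m).drop (m - 5)) (fun y => y)).getD 0 + ai) := by
  have hw : (vl a m).length = m + 1 := vl_length a m
  set w := vl a m with hwdef
  have hs : m + 1 - 6 < w.length := by omega
  have hms : m - 5 = m + 1 - 6 := by omega
  have hdrop : w.drop (m - 5) = w.getD (m+1-6) 0 :: w.drop (m + 1 - 6 + 1) := by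
    have hs' : m - 5 < w.length := by omega
    rw [List.drop_eq_getElem_cons hs', ← hms]
    congr 1
    simp [List.getD, List.getElem?_eq_getElem hs']
  rw [hdrop, PySem.List.max?_id_cons]
  have hlen : m + 1 - (m + 1 - 6) = (m + 1 - (m + 1 - 6) - 1) + 1 := by omega
  rw [hlen, List.range'_succ]
  simp only [List.foldl_cons]
  have h1 : omax none (some (w.getD (m+1-6) 0 + ai)) = some (w.getD (m+1-6) 0 + ai) := rfl
  rw [h1, fold_omax]
  have hbr : (List.range' (m+1-6+1) (m + 1 - (m+1-6) - 1)).foldl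
        (fun acc j => max acc (w.getD j 0)) (w.getD (m+1-6) 0)
      = (w.drop (m+1-6+1)).foldl max (w.getD (m+1-6) 0) := by
    have ht : m + 1 - (m+1-6) - 1 = w.length - (m+1-6+1) := by omega
    rw [ht, ← map_getD_range'_drop w (m+1-6+1), List.foldl_map]
  rw [hbr]
  simp

lemma A_outer (a : List Int) (h : a ≠ []) : ∀ (m : Nat), m ≤ a.length - 1 →
    (List.range (m+1)).foldl (fun dp i =>
        (List.range' (i - 6) (i - (i - 6))).foldl (fun dp j =>
          dp.set i (omax (dp.getD i none) (oadd (dp.getD j none) (a.getD i 0)))) dp)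
      ((List.replicate a.length (none : Option Int)).set 0 (some (a.getD 0 0)))
      = (vl a m).map some ++ List.replicate (a.length - 1 - m) (none : Option Int) := by
  have hlen : 0 < a.length := List.length_pos_of_ne_nil h
  intro m
  induction m with
  | zero =>
    intro _
    rw [show List.range 1 = [0] from rfl]
    simp only [List.foldl_cons, List.foldl_nil]
    rw [show List.range' (0 - 6) (0 - (0 - 6)) = ([] : List Nat) from rfl]
    simp only [List.foldl_nil]
    obtain ⟨n', hn⟩ : ∃ n', a.length = n' + 1 := ⟨a.length - 1, by omega⟩
    rw [hn]
    simp [List.replicate_succ, vl]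
  | succ m ih =>
    intro hm
    have hm' : m ≤ a.length - 1 := by omega
    rw [List.range_succ, List.foldl_append, ih hm']
    simp only [List.foldl_cons, List.foldl_nil]
    set dpm := (vl a m).map some ++ List.replicate (a.length - 1 - m) (none : Option Int) with hdpm
    have hlend : dpm.length = a.length := by
      rw [hdpm]; simp [vl_length]; omega
    have hIlt : m + 1 < dpm.length := by rw [hlend]; omega
    have hne : ∀ j ∈ List.range' (m + 1 - 6) (m + 1 - (m + 1 - 6)), j ≠ m + 1 := by
      intro j hj
      rw [List.mem_range'_1] at hj
      omega
    rw [inner_fold (a.getD (m+1) 0) (m+1) _ dpm hIlt hne]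
    have hI0 : dpm.getD (m+1) none = none := by
      rw [hdpm, List.getD_append_right _ _ _ _ (by simp [vl_length])]
      simp only [List.length_map, vl_length, Nat.sub_self]
      simp only [List.getD, List.getElem?_replicate]
      split <;> rfl
    have hcongr : (List.range' (m + 1 - 6) (m + 1 - (m + 1 - 6))).foldl
          (fun acc j => omax acc (oadd (dpm.getD j none) (a.getD (m+1) 0))) (dpm.getD (m+1) none)
        = (List.range' (m + 1 - 6) (m + 1 - (m + 1 - 6))).foldl
          (fun acc j => omax acc (some ((vl a m).getD j 0 + a.getD (m+1) 0))) none := by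
      rw [hI0]
      apply PySem.List.foldl_congr_mem
      intro acc j hj
      rw [List.mem_range'_1] at hj
      have hjm : j < m + 1 := by omega
      have hdj : dpm.getD j none = some ((vl a m).getD j 0) := by
        rw [hdpm, List.getD_append _ _ _ j (by simp [vl_length]; omega),
          getD_map_some _ _ (by rw [vl_length]; omega)]
      rw [hdj]
      rfl
    rw [hcongr, window_val]
    have hrep : a.length - 1 - m = (a.length - 1 - (m+1)) + 1 := by omega
    rw [hdpm, List.set_append, if_neg (by simp [vl_length])]
    simp only [List.length_map, vl_length, Nat.sub_self]
    rw [hrep, List.replicate_succ, List.set_cons_zero]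
    simp only [vl, List.map_append, List.append_assoc]
    rfl

lemma A_eq (a : List Int) (h : a ≠ []) :
    solution a = (vl a (a.length - 1)).getLastD 0 := by
  have hlen : 0 < a.length := List.length_pos_of_ne_nil h
  unfold solution
  simp only []
  rw [show List.range a.length = List.range ((a.length - 1) + 1) by congr 1; omega]
  rw [A_outer a h (a.length - 1) le_rfl]
  simp only [Nat.sub_self, List.replicate_zero, List.append_nil]
  rw [getD_map_some _ _ (by rw [vl_length]; omega)]
  simp only [Option.getD_some]
  have hv : vl a (a.length - 1) ≠ [] := by
    intro hc
    have := vl_length a (a.length - 1)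
    rw [hc] at this
    simp at this
  rw [← getD_eq_getLastD _ hv]
  congr 1
  rw [vl_length]
  omega

-- ===== VERDICT (by name: the statement is the Claim_ definition above) =====
theorem solution_spec : Claim_equal_solution := by
  intro a _ h
  unfold Spec_solution
  rw [A_eq a h, B_eq a h]
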